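-- pv_equiv track=rewrite | github.com/kumin/AlgorithmsDataStructures | src/main/python/weekendcontest/26-07-2020/BulbSwitcher.py | minFlips
-- ===== SOURCE A (Python) =====
-- def minFlips(target: str) -> int:
--     n = len(target)
--     origin = ['0'] * n
--     count = 0
--     for i in range(n):
--         if ''.join(origin) == target:
--             break
--         if origin[i] != target[i]:
--             count += 1
--             for j in range(i, n):
--                 origin[j] = str(abs(int(origin[j]) - 1))
--     return count
-- ===== SOURCE B (Python) =====
-- def minFlips(target: str) -> int:
--     # One pass: track the current uniform suffix state; flip when the next char differs.
--     count = 0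
--     state = '0'
--     for ch in target:
--         if ch != state:
--             count += 1
--             state = '1' if state == '0' else '0'
--     return count
-- ===== Notes on version B (the rewrite author's own statement) =====
-- stated objective: faster
-- what changed: Replaced A's O(n^2) simulation (re-joining the whole array and flipping the entire suffix on each mismatch) with a single pass that tracks the current uniform suffix state and counts transitions.
import Mathlib
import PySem

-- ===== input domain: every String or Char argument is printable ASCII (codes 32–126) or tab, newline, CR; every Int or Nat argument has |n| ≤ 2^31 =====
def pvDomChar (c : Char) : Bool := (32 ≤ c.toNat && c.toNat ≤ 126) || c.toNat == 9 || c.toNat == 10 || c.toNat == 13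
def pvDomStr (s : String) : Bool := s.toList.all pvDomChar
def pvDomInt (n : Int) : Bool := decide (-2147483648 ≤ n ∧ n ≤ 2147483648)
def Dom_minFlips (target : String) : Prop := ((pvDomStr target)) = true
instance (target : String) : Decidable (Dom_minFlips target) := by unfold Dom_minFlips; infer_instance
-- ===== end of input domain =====

-- B replaces A's quadratic simulation (re-joining and flipping the whole suffix each step)
-- by a single pass that tracks the uniform suffix state; objective: faster (asymptotic).

-- ===== PORT A =====
-- ''.join(origin)
def pvJoin (l : List String) : String := l.foldl (· ++ ·) ""

-- str(abs(int(s) - 1)); the cells are always "0"/"1", so int() never raises (getD 0 is never used)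
def pvFlipCell (s : String) : String := PySem.Int.toStr |((PySem.Int.ofStr? s).getD 0 - 1)|

-- for j in range(i, n): origin[j] = str(abs(int(origin[j]) - 1)); fuel = n - i, always in range
def pvFlipFrom : Nat → Nat → List String → List String
  | 0, _, l => l
  | fuel + 1, j, l => pvFlipFrom fuel (j + 1) (l.set j (pvFlipCell (l.getD j "")))

-- the outer for-i loop with its break; fuel = n - i
def pvLoopA (tgt : List Char) (n : Nat) : Nat → Nat → List String → Int → Int
  | 0, _, _, count => count
  | fuel + 1, i, origin, count =>
    if pvJoin origin = String.ofList tgt then count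
    else if origin.getD i "" ≠ String.ofList [tgt.getD i ' '] then
      pvLoopA tgt n fuel (i + 1) (pvFlipFrom (n - i) i origin) (count + 1)
    else
      pvLoopA tgt n fuel (i + 1) origin count

def minFlips (target : String) : Int :=
  let tgt := target.toList
  let n := tgt.length
  pvLoopA tgt n n 0 (List.replicate n "0") 0

-- ===== PORT B =====
def pvStepB (st : Int × Char) (ch : Char) : Int × Char :=
  if ch ≠ st.2 then (st.1 + 1, if st.2 = '0' then '1' else '0') else st

def minFlips_alt (target : String) : Int :=
  (target.toList.foldl pvStepB (0, '0')).1

-- ===== PRECONDITION & SPEC =====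
def Spec_minFlips (target : String) (out : Int) : Prop := out = minFlips_alt target
instance (target : String) (out : Int) : Decidable (Spec_minFlips target out) := by unfold Spec_minFlips; infer_instance

-- ===== CLAIM (what is proved, stated in full; the proofs are below) =====
def Claim_equal_minFlips : Prop := ∀ (target : String), Dom_minFlips target → Spec_minFlips target (minFlips target)

-- ===== LEMMAS AND PROOFS =====
-- B's state toggle, named for the proofs
def pvFlip (c : Char) : Char := if c = '0' then '1' else '0'

-- single-char string
def pvStrO (c : Char) : String := String.ofList [c]

theorem pvStrO_inj {a b : Char} (h : pvStrO a = pvStrO b) : a = b := by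
  have := congrArg String.toList h
  simpa [pvStrO] using this

theorem pvJoin_acc (l : List Char) : ∀ (a : String), List.foldl (· ++ ·) a (l.map pvStrO) = a ++ String.ofList l := by
  induction l with
  | nil => intro a; simp
  | cons c cs ih =>
    intro a
    simp only [List.map_cons, List.foldl_cons, ih]
    rw [String.append_assoc, pvStrO, ← String.ofList_append]
    rfl

theorem pvJoin_map (l : List Char) : pvJoin (l.map pvStrO) = String.ofList l := by
  simpa using pvJoin_acc l ""

theorem getD_append_cons {α : Type} (p : List α) (x : α) (r : List α) (d : α) :
    (p ++ x :: r).getD p.length d = x := by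
  induction p with
  | nil => rfl
  | cons a as ih => simp

theorem set_append_cons {α : Type} (p : List α) (x y : α) (r : List α) :
    (p ++ x :: r).set p.length y = p ++ y :: r := by
  induction p with
  | nil => rfl
  | cons a as ih => simp [ih]

theorem pvFlipCell_strO (st : Char) (hst : st = '0' ∨ st = '1') :
    pvFlipCell (pvStrO st) = pvStrO (pvFlip st) := by
  rcases hst with h | h <;> subst h <;> decide

theorem pvFlipFrom_eq (st : Char) (hst : st = '0' ∨ st = '1') :
    ∀ (m : Nat) (p : List String),
      pvFlipFrom m p.length (p ++ List.replicate m (pvStrO st)) =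
        p ++ List.replicate m (pvStrO (pvFlip st)) := by
  intro m
  induction m with
  | zero => intro p; rfl
  | succ k ih =>
    intro p
    simp only [List.replicate_succ, pvFlipFrom]
    rw [getD_append_cons, pvFlipCell_strO st hst, set_append_cons]
    have h1 : p ++ pvStrO (pvFlip st) :: List.replicate k (pvStrO st)
        = (p ++ [pvStrO (pvFlip st)]) ++ List.replicate k (pvStrO st) := by simp
    have h2 : p.length + 1 = (p ++ [pvStrO (pvFlip st)]).length := by simp
    rw [h1, h2, ih (p ++ [pvStrO (pvFlip st)])]
    simp

theorem foldl_stepB_const (l : List Char) (c : Char) (h : ∀ x ∈ l, x = c) (count : Int) :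
    List.foldl pvStepB (count, c) l = (count, c) := by
  induction l with
  | nil => rfl
  | cons x xs ih =>
    have hx : x = c := h x (by simp)
    subst hx
    rw [List.foldl_cons, show pvStepB (count, x) x = (count, x) by simp [pvStepB]]
    exact ih (fun y hy => h y (by simp [hy]))

theorem pvLoopA_eq :
    ∀ (rest prefT pref : List Char) (st : Char) (count : Int),
      (st = '0' ∨ st = '1') →
      pref.length = prefT.length →
      pvLoopA (prefT ++ rest) (prefT.length + rest.length) rest.length prefT.length
          ((pref ++ List.replicate rest.length st).map pvStrO) count
        = (List.foldl pvStepB (count, st) rest).1 := by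
  intro rest
  induction rest with
  | nil => intro prefT pref st count _ _; rfl
  | cons ch rs ih =>
    intro prefT pref st count hst hlen
    simp only [List.length_cons, pvLoopA]
    by_cases hjoin :
        pvJoin (((pref ++ List.replicate (rs.length + 1) st).map pvStrO)) = String.ofList (prefT ++ ch :: rs)
    · rw [if_pos hjoin]
      rw [pvJoin_map] at hjoin
      have hlists : pref ++ List.replicate (rs.length + 1) st = prefT ++ ch :: rs := by
        have := congrArg String.toList hjoin; simpa using this
      have hsplit := List.append_inj hlists hlen
      have hrep : List.replicate (rs.length + 1) st = ch :: rs := hsplit.2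
      have hmem : ∀ x ∈ ch :: rs, x = st := fun x hx =>
        List.eq_of_mem_replicate (hrep ▸ hx)
      rw [foldl_stepB_const (ch :: rs) st hmem count]
    · rw [if_neg hjoin]
      -- index accesses
      have hgetT : (prefT ++ ch :: rs).getD prefT.length ' ' = ch := getD_append_cons _ _ _ _
      have horigin : (pref ++ List.replicate (rs.length + 1) st).map pvStrO
          = pref.map pvStrO ++ pvStrO st :: (List.replicate rs.length st).map pvStrO := by
        simp [List.replicate_succ]
      have hlenO : (pref.map pvStrO).length = prefT.length := by simpa using hlen
      have hgetO : ((pref ++ List.replicate (rs.length + 1) st).map pvStrO).getD prefT.length ""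
          = pvStrO st := by
        rw [horigin, ← hlenO]; exact getD_append_cons _ _ _ _
      rw [hgetT, hgetO]
      by_cases hne : st = ch
      · -- match: origin[i] == target[i]
        rw [if_neg (by simp [pvStrO, hne])]
        have h1 : prefT ++ ch :: rs = (prefT ++ [ch]) ++ rs := by simp
        have h2 : prefT.length + (rs.length + 1) = (prefT ++ [ch]).length + rs.length := by
          simp; omega
        have h3 : (pref ++ List.replicate (rs.length + 1) st).map pvStrO
            = ((pref ++ [st]) ++ List.replicate rs.length st).map pvStrO := by
          simp [List.replicate_succ]
        have h4 : prefT.length + 1 = (prefT ++ [ch]).length := by simp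
        rw [h1, h2, h3, h4, ih (prefT ++ [ch]) (pref ++ [st]) st count hst (by simp [hlen])]
        simp [List.foldl_cons, pvStepB, hne]
      · -- mismatch: flip the suffix, count + 1
        rw [if_pos (by simpa [pvStrO] using fun h => hne (pvStrO_inj h))]
        have hni : prefT.length + (rs.length + 1) - prefT.length = rs.length + 1 := by omega
        have hflip : pvFlipFrom (prefT.length + (rs.length + 1) - prefT.length) prefT.length
            ((pref ++ List.replicate (rs.length + 1) st).map pvStrO)
            = (pref ++ List.replicate (rs.length + 1) (pvFlip st)).map pvStrO := by
          rw [hni]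
          have := pvFlipFrom_eq st hst (rs.length + 1) (pref.map pvStrO)
          rw [hlenO] at this
          simpa [List.map_append, List.map_replicate] using this
        rw [hflip]
        have h1 : prefT ++ ch :: rs = (prefT ++ [ch]) ++ rs := by simp
        have h2 : prefT.length + (rs.length + 1) = (prefT ++ [ch]).length + rs.length := by
          simp; omega
        have h3 : (pref ++ List.replicate (rs.length + 1) (pvFlip st)).map pvStrO
            = ((pref ++ [pvFlip st]) ++ List.replicate rs.length (pvFlip st)).map pvStrO := by
          simp [List.replicate_succ]
        have h4 : prefT.length + 1 = (prefT ++ [ch]).length := by simp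
        have hst' : pvFlip st = '0' ∨ pvFlip st = '1' := by
          rcases hst with h | h <;> subst h <;> simp [pvFlip]
        rw [h1, h2, h3, h4, ih (prefT ++ [ch]) (pref ++ [pvFlip st]) (pvFlip st) (count + 1) hst' (by simp [hlen])]
        have hne' : ¬ ch = st := fun h => hne h.symm
        simp [List.foldl_cons, pvStepB, pvFlip, hne']

-- ===== VERDICT (by name: the statement is the Claim_ definition above) =====
theorem minFlips_spec : Claim_equal_minFlips := by
  intro target _
  unfold Spec_minFlips minFlips minFlips_alt
  have h := pvLoopA_eq target.toList [] [] '0' 0 (Or.inl rfl) rfl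
  simpa [List.map_replicate, pvStrO] using h
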